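-- pv_equiv track=rewrite | github.com/vikasvarma34/job-scaper | scraper.py | _count_keyword_hits
-- ===== SOURCE A (Python) =====
-- def _normalize_text(value: str | None) -> str:
--     return (value or "").strip().lower()
--
-- def _count_keyword_hits(text: str, keywords: list[str] | tuple[str, ...]) -> int:
--     normalized = _normalize_text(text)
--     if not normalized:
--         return 0
--     matched: set[str] = set()
--     for keyword in keywords:
--         cleaned_keyword = _normalize_text(keyword)
--         if cleaned_keyword and cleaned_keyword in normalized:
--             matched.add(cleaned_keyword)
--     return len(matched)
-- ===== SOURCE B (Python) =====
-- def _count_keyword_hits(text, keywords):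
--     normalized = (text or "").strip().lower()
--     cleaned = {(k or "").strip().lower() for k in keywords}
--     cleaned.discard("")
--     n = len(normalized)
--     lengths = {len(k) for k in cleaned if len(k) <= n}
--     present = {normalized[i:i + L] for L in lengths for i in range(n - L + 1)}
--     return len(cleaned & present)
-- ===== Notes on version B (the rewrite author's own statement) =====
-- stated objective: faster
-- what changed: B inverts the search: instead of scanning the whole text once per keyword with 'in', it indexes all substrings of the normalized text at the distinct keyword lengths into a hash set and counts hits by a set intersection, so each keyword costs one hash lookup instead of an O(T) scan.
import Mathlib
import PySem

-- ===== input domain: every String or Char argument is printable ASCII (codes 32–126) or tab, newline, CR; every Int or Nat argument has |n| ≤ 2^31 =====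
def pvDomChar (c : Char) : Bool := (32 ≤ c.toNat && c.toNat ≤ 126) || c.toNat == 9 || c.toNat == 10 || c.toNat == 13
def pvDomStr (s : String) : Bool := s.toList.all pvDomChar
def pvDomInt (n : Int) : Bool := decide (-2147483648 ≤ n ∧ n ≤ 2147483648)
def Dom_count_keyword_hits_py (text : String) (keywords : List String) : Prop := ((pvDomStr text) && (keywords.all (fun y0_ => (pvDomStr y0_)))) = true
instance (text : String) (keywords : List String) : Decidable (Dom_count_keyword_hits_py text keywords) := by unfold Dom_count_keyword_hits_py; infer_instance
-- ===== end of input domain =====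

-- B inverts the search: it indexes all substrings of the text (at the distinct keyword lengths)
-- into a set and counts the hit keywords by set intersection, instead of A's per-keyword 'in' scan.

-- ===== PORT A =====
-- _normalize_text(value) = (value or "").strip().lower(); arguments here are always str, so 'value or ""' = value.
-- Strings are handled as their char lists throughout (PySem.Chars is the exact Python semantics).
def pvNormChars (s : String) : List Char := PySem.Chars.lower (PySem.Chars.strip s.toList)

def count_keyword_hits_py (text : String) (keywords : List String) : Int :=
  let normalized := pvNormChars text
  if normalized.isEmpty then 0
  else
    let matched : PySem.Set (List Char) :=
      keywords.foldl (fun m keyword =>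
        let ck := pvNormChars keyword
        if (!ck.isEmpty) && PySem.Chars.isIn ck normalized then PySem.Set.add m ck else m)
        PySem.Set.empty
    (matched.length : Int)

-- ===== PORT B =====
def count_keyword_hits_py_alt (text : String) (keywords : List String) : Int :=
  let normalized := pvNormChars text
  let cleaned : PySem.Set (List Char) :=
    PySem.Set.discard (PySem.Set.ofList (keywords.map pvNormChars)) []
  let n := normalized.length
  let lengths : PySem.Set Nat :=
    PySem.Set.ofList ((cleaned.filter (fun k => k.length ≤ n)).map List.length)
  let present : PySem.Set (List Char) :=
    PySem.Set.ofList (lengths.flatMap (fun L =>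
      (List.range (n - L + 1)).map (fun (i : Nat) =>
        PySem.List.slice normalized (some (i : Int)) (some ((i : Int) + (L : Int))))))
  ((PySem.Set.inter cleaned present).length : Int)

-- ===== PRECONDITION & SPEC =====
def Spec_count_keyword_hits_py (text : String) (keywords : List String) (out : Int) : Prop := out = count_keyword_hits_py_alt text keywords
instance (text : String) (keywords : List String) (out : Int) : Decidable (Spec_count_keyword_hits_py text keywords out) := by unfold Spec_count_keyword_hits_py; infer_instance

-- ===== CLAIM (what is proved, stated in full; the proofs are below) =====
def Claim_equal_count_keyword_hits_py : Prop := ∀ (text : String) (keywords : List String), Dom_count_keyword_hits_py text keywords → Spec_count_keyword_hits_py text keywords (count_keyword_hits_py text keywords)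

-- ===== LEMMAS AND PROOFS =====

-- A's guarded accumulation loop is Set.update with the filtered list
theorem pv_foldl_add_eq (L : List (List Char)) (q : List Char → Bool) (s : PySem.Set (List Char)) :
    L.foldl (fun m x => if q x then PySem.Set.add m x else m) s
      = PySem.Set.update s (L.filter q) := by
  induction L generalizing s with
  | nil => simp [PySem.Set.update]
  | cons x L ih =>
      by_cases h : q x = true <;> simp [h, ih, PySem.Set.update]

-- membership in B's substring index means 'substring of normalized', for nonempty k of indexed length
theorem pv_mem_present (normalized k : List Char) (lengths : List Nat)
    (hk : k ≠ []) (hlen : k.length ≤ normalized.length → k.length ∈ lengths) :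
    (k ∈ PySem.Set.ofList (lengths.flatMap (fun L =>
        (List.range (normalized.length - L + 1)).map (fun (i : Nat) =>
          PySem.List.slice normalized (some (i : Int)) (some ((i : Int) + (L : Int))))))
      ↔ PySem.Chars.isIn k normalized = true) := by
  rw [PySem.Set.mem_ofList, List.mem_flatMap]
  constructor
  · rintro ⟨L, hL, hmem⟩
    rw [List.mem_map] at hmem
    obtain ⟨i, hi, hslice⟩ := hmem
    rw [PySem.List.slice_natCast_add] at hslice
    rw [← PySem.Chars.exists_prefix_drop_iff_isIn]
    exact ⟨i, hslice ▸ List.take_prefix _ _⟩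
  · intro hin
    rw [← PySem.Chars.exists_prefix_drop_iff_isIn] at hin
    obtain ⟨j, hj⟩ := hin
    have hjk : k = (normalized.drop j).take k.length := List.prefix_iff_eq_take.mp hj
    have hlk : k.length ≤ normalized.length - j := by
      have := hj.length_le
      simpa [List.length_drop] using this
    have hkn : k.length ≤ normalized.length := le_trans hlk (Nat.sub_le _ _)
    have hkpos : 0 < k.length := List.length_pos_iff.mpr hk
    refine ⟨k.length, hlen hkn, ?_⟩
    rw [List.mem_map]
    refine ⟨j, ?_, ?_⟩
    · rw [List.mem_range]; omega
    · rw [PySem.List.slice_natCast_add]; exact hjk.symm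

theorem pv_main (text : String) (keywords : List String) :
    count_keyword_hits_py text keywords = count_keyword_hits_py_alt text keywords := by
  simp only [count_keyword_hits_py, count_keyword_hits_py_alt]
  set normalized := pvNormChars text with hN
  set cleaned : PySem.Set (List Char) :=
    PySem.Set.discard (PySem.Set.ofList (keywords.map pvNormChars)) [] with hC
  set lengths : PySem.Set Nat :=
    PySem.Set.ofList ((cleaned.filter (fun k => k.length ≤ normalized.length)).map List.length)
    with hL
  have hmemC : ∀ k, k ∈ (cleaned : List (List Char)) ↔
      (k ∈ keywords.map pvNormChars ∧ k ≠ []) := by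
    intro k
    rw [hC, PySem.Set.mem_discard, PySem.Set.mem_ofList]
  have hmemL : ∀ k, k ∈ keywords.map pvNormChars → k ≠ [] →
      k.length ≤ normalized.length → k.length ∈ (lengths : List Nat) := by
    intro k hk1 hk2 hkn
    rw [hL, PySem.Set.mem_ofList]
    exact List.mem_map.mpr ⟨k, List.mem_filter.mpr ⟨(hmemC k).mpr ⟨hk1, hk2⟩, by simpa using hkn⟩, rfl⟩
  -- the intersection picks exactly the normalized keywords that are substrings
  have key : ∀ k, k ∈ PySem.Set.inter cleaned
      (PySem.Set.ofList (lengths.flatMap (fun L =>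
        (List.range (normalized.length - L + 1)).map (fun (i : Nat) =>
          PySem.List.slice normalized (some (i : Int)) (some ((i : Int) + (L : Int)))))))
      ↔ k ∈ keywords.map pvNormChars ∧ ((!k.isEmpty) && PySem.Chars.isIn k normalized) = true := by
    intro k
    rw [PySem.Set.mem_inter, hmemC]
    constructor
    · rintro ⟨⟨hk1, hk2⟩, hp⟩
      refine ⟨hk1, ?_⟩
      have := (pv_mem_present normalized k lengths hk2 (hmemL k hk1 hk2) ).mp hp
      simp [hk2, this]
    · rintro ⟨hk1, hcond⟩
      rw [Bool.and_eq_true] at hcond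
      have hk2 : k ≠ [] := by simpa using hcond.1
      exact ⟨⟨hk1, hk2⟩,
        (pv_mem_present normalized k lengths hk2 (hmemL k hk1 hk2) ).mpr hcond.2⟩
  by_cases hempty : normalized.isEmpty
  · rw [if_pos hempty]
    have hnil : normalized = [] := by simpa using hempty
    have hInil : PySem.Set.inter cleaned
        (PySem.Set.ofList (lengths.flatMap (fun L =>
          (List.range (normalized.length - L + 1)).map (fun (i : Nat) =>
            PySem.List.slice normalized (some (i : Int)) (some ((i : Int) + (L : Int))))))) = [] := by
      rw [List.eq_nil_iff_forall_not_mem]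
      intro k hk
      have hcond := ((key k).mp hk).2
      rw [Bool.and_eq_true] at hcond
      have hk2 : k ≠ [] := by simpa using hcond.1
      have hIn := hcond.2
      rw [hnil, PySem.Chars.isIn_iff_infix] at hIn
      exact hk2 (by simpa using hIn)
    rw [hInil]; rfl
  · rw [if_neg hempty]
    congr 1
    rw [← List.foldl_map
          (f := pvNormChars)
          (g := fun (m : PySem.Set (List Char)) (x : List Char) =>
            if ((!x.isEmpty) && PySem.Chars.isIn x normalized) = true
            then PySem.Set.add m x else m)]
    rw [pv_foldl_add_eq]
    rw [show ∀ xs : List (List Char), PySem.Set.update PySem.Set.empty xs = PySem.Set.ofList xs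
          from fun xs => rfl]
    apply List.Perm.length_eq
    refine List.perm_ext_iff_of_nodup (PySem.Set.nodup_ofList _)
      (PySem.Set.nodup_inter _ _ (PySem.Set.nodup_discard _ _ (PySem.Set.nodup_ofList _))) |>.mpr ?_
    intro k
    rw [PySem.Set.mem_ofList, List.mem_filter, key k]

-- ===== VERDICT (by name: the statement is the Claim_ definition above) =====
theorem count_keyword_hits_py_spec : Claim_equal_count_keyword_hits_py := by
  intro text keywords _
  unfold Spec_count_keyword_hits_py
  exact pv_main text keywords
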